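-- pv_equiv track=rewrite | github.com/nathan-builds/python_labs | labs2.py | pyramid_blocks
-- ===== SOURCE A (Python) =====
-- def pyramid_blocks(n, m, h):
--     sum_total = 0
--
--     while h:
--         sum_total += n * m
--         n += 1
--         m += 1
--         h -= 1
--     return sum_total
-- ===== SOURCE B (Python) =====
-- def pyramid_blocks(n, m, h):
--     # closed form: sum_{k=0}^{h-1} (n+k)(m+k)
--     return h * n * m + (n + m) * (h * (h - 1) // 2) + (h - 1) * h * (2 * h - 1) // 6
-- ===== Notes on version B (the rewrite author's own statement) =====
-- stated objective: faster
-- what changed: Replaces the O(h) accumulation loop with the closed-form polynomial h*n*m + (n+m)*h(h-1)/2 + (h-1)h(2h-1)/6.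
import Mathlib
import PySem

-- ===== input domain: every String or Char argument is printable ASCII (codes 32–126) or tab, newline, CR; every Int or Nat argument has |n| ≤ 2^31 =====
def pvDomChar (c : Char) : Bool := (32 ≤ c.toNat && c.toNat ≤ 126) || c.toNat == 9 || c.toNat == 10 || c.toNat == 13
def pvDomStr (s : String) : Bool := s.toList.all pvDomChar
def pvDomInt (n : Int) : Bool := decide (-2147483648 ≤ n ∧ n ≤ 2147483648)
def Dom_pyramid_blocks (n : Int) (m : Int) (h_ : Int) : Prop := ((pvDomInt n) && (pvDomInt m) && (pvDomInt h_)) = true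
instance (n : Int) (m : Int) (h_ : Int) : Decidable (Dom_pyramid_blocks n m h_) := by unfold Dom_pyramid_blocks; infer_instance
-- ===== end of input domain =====

-- B replaces A's O(h) accumulation loop with the closed-form polynomial (faster, asymptotic).

-- ===== PORT A =====
-- A's while-loop: each iteration adds n*m to the accumulator and increments n, m, decrementing h.
-- On Pre_ (0 ≤ h_) the loop runs exactly h_ times, so the fuel is h_.toNat; for h_ < 0 the
-- Python loop never terminates, which Pre_ excludes.
def pyramidLoopA (n m sum_total : Int) : Nat → Int
  | 0 => sum_total
  | k + 1 => pyramidLoopA (n + 1) (m + 1) (sum_total + n * m) k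

def pyramid_blocks (n : Int) (m : Int) (h_ : Int) : Int :=
  pyramidLoopA n m 0 h_.toNat

-- ===== PORT B =====
def pyramid_blocks_alt (n : Int) (m : Int) (h_ : Int) : Int :=
  h_ * n * m + (n + m) * (PySem.Int.floordiv (h_ * (h_ - 1)) 2)
    + PySem.Int.floordiv ((h_ - 1) * h_ * (2 * h_ - 1)) 6

-- ===== PRECONDITION & SPEC =====
-- Pre_ excludes h_ < 0, on which A's 'while h:' loop never terminates (no return).
def Pre_pyramid_blocks (n : Int) (m : Int) (h_ : Int) : Prop := 0 ≤ h_
instance (n : Int) (m : Int) (h_ : Int) : Decidable (Pre_pyramid_blocks n m h_) := by unfold Pre_pyramid_blocks; infer_instance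
def pvWitness_pyramid_blocks : Int × Int × Int := (3, 4, 5)

def Spec_pyramid_blocks (n : Int) (m : Int) (h_ : Int) (out : Int) : Prop := out = pyramid_blocks_alt n m h_
instance (n : Int) (m : Int) (h_ : Int) (out : Int) : Decidable (Spec_pyramid_blocks n m h_ out) := by unfold Spec_pyramid_blocks; infer_instance

-- ===== CLAIM (what is proved, stated in full; the proofs are below) =====
def Claim_equal_pyramid_blocks : Prop := ∀ (n : Int) (m : Int) (h_ : Int), Dom_pyramid_blocks n m h_ → Pre_pyramid_blocks n m h_ → Spec_pyramid_blocks n m h_ (pyramid_blocks n m h_)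

-- ===== LEMMAS AND PROOFS =====

-- accumulator lemma
theorem pyramidLoopA_acc (k : Nat) : ∀ (n m s : Int),
    pyramidLoopA n m s k = s + pyramidLoopA n m 0 k := by
  induction k with
  | zero => intro n m s; simp [pyramidLoopA]
  | succ k ih =>
    intro n m s
    simp only [pyramidLoopA]
    rw [ih (n+1) (m+1) (s + n*m), ih (n+1) (m+1) (0 + n*m)]
    ring

theorem two_dvd_mul_pred (h : Int) : (2 : Int) ∣ h * (h - 1) := by
  have : Even ((h - 1) * ((h - 1) + 1)) := Int.even_mul_succ_self (h - 1)
  have e : h * (h - 1) = (h - 1) * ((h - 1) + 1) := by ring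
  rw [e]
  exact this.two_dvd

theorem pyramid_closed (k : Nat) : ∀ (n m : Int),
    pyramidLoopA n m 0 k =
      (k : Int) * n * m + (n + m) * ((k : Int) * ((k : Int) - 1) / 2)
        + ((k : Int) - 1) * (k : Int) * (2 * (k : Int) - 1) / 6 := by
  induction k with
  | zero => intro n m; simp [pyramidLoopA]
  | succ k ih =>
    intro n m
    simp only [pyramidLoopA]
    rw [pyramidLoopA_acc, ih (n+1) (m+1)]
    push_cast
    set K : Int := (k : Int) with hK
    have e1 : (K + 1) * ((K + 1) - 1) = K * (K - 1) + K * 2 := by ring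
    have e2 : ((K + 1) - 1) * (K + 1) * (2 * (K + 1) - 1) =
        (K - 1) * K * (2 * K - 1) + (K * K) * 6 := by ring
    rw [e1, e2,
      Int.add_mul_ediv_right (K * (K - 1)) K (by norm_num : (2:Int) ≠ 0),
      Int.add_mul_ediv_right ((K - 1) * K * (2 * K - 1)) (K * K) (by norm_num : (6:Int) ≠ 0)]
    have h2T : K * (K - 1) / 2 * 2 = K * (K - 1) :=
      Int.ediv_mul_cancel (two_dvd_mul_pred K)
    set T : Int := K * (K - 1) / 2 with hT
    linear_combination h2T

-- ===== VERDICT (by name: the statement is the Claim_ definition above) =====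
theorem pyramid_blocks_spec : Claim_equal_pyramid_blocks := by
  intro n m h_ _ hpre
  unfold Spec_pyramid_blocks pyramid_blocks pyramid_blocks_alt
  rw [pyramid_closed h_.toNat n m]
  rw [PySem.Int.floordiv_eq_ediv_of_pos (by norm_num : (0:Int) < 2),
      PySem.Int.floordiv_eq_ediv_of_pos (by norm_num : (0:Int) < 6)]
  have ht : ((h_.toNat : Int)) = h_ := Int.toNat_of_nonneg hpre
  rw [ht]
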